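-- pv_equiv track=rewrite | github.com/nert-nlp/cgel | cgel.py | linediff
-- ===== SOURCE A (Python) =====
-- def linediff(a: str, b: str) -> str:
--     """Given two strings, produce a string that shows a line-by-line comparison"""
--     s = ''
--     aa = a.splitlines()
--     bb = b.splitlines()
--     for i in range(len(aa)):
--         aln = aa[i]
--         if i<len(bb):
--             bln = bb[i]
--             if aln==bln:
--                 s += '= ' + aln + '\n'
--             else:
--                 s += '< ' + aln + '\n' + '> ' + bln + '\n'
--         else:
--             s += '< ' + aln + '\n'
--     if len(bb)>len(aa):
--         for i in range(len(aa),len(bb)):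
--             s += '> ' + bb[i] + '\n'
--     return s
-- ===== SOURCE B (Python) =====
-- def linediff(a: str, b: str) -> str:
--     """Given two strings, produce a string that shows a line-by-line comparison"""
--     _SENTINEL = object()
--     ai = iter(a.splitlines())
--     bi = iter(b.splitlines())
--     pieces = []
--     while True:
--         aln = next(ai, _SENTINEL)
--         bln = next(bi, _SENTINEL)
--         if aln is _SENTINEL and bln is _SENTINEL:
--             break
--         if bln is _SENTINEL:
--             pieces.append('< ' + aln + '\n')
--         elif aln is _SENTINEL:
--             pieces.append('> ' + bln + '\n')
--         elif aln == bln: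
--             pieces.append('= ' + aln + '\n')
--         else:
--             pieces.append('< ' + aln + '\n' + '> ' + bln + '\n')
--     return ''.join(pieces)
-- ===== Notes on version B (the rewrite author's own statement) =====
-- stated objective: alternative
-- what changed: Replaces the index loop over range(len(aa)) with an in-body length test plus a separate tail loop by one paired traversal of both line iterators with a private sentinel fillvalue, collecting pieces and joining once instead of repeated string concatenation.
import Mathlib
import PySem

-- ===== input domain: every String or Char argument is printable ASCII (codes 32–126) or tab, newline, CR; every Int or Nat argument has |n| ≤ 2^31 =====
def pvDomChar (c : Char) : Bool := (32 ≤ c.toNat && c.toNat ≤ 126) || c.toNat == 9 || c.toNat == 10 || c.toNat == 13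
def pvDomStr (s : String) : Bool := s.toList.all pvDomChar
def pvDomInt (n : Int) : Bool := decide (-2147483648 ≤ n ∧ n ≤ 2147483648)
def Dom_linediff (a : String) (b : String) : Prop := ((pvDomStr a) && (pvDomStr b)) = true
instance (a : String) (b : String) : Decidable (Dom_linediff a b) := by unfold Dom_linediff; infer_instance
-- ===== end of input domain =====

-- B replaces A's index loop (with its in-body length test) plus separate tail loop by one
-- paired traversal of the two line lists, collecting pieces and joining once (alternative decomposition).

-- ===== PORT A =====
-- literal transliteration of A: index loop over range(len(aa)), then a tail loop over range(len(aa), len(bb))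
def linediff (a : String) (b : String) : String :=
  let aa := PySem.Str.splitlines a
  let bb := PySem.Str.splitlines b
  let s : String :=
    (PySem.List.pyRange 0 (PySem.List.len aa) 1).foldl (fun s i =>
      let aln := PySem.List.pyGetD aa i ""
      if i < PySem.List.len bb then
        let bln := PySem.List.pyGetD bb i ""
        if aln == bln then
          s ++ "= " ++ aln ++ "\n"
        else
          s ++ "< " ++ aln ++ "\n" ++ "> " ++ bln ++ "\n"
      else
        s ++ "< " ++ aln ++ "\n") ""
  if PySem.List.len bb > PySem.List.len aa then
    (PySem.List.pyRange (PySem.List.len aa) (PySem.List.len bb) 1).foldl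
      (fun s i => s ++ "> " ++ PySem.List.pyGetD bb i "" ++ "\n") s
  else
    s

-- ===== PORT B =====
-- B's sentinel loop over the paired iterators = structural recursion on the two remaining line lists
def pvPairDiff : List String → List String → List String
  | [], [] => []
  | aln :: aa, [] => ("< " ++ aln ++ "\n") :: pvPairDiff aa []
  | [], bln :: bb => ("> " ++ bln ++ "\n") :: pvPairDiff [] bb
  | aln :: aa, bln :: bb =>
      (if aln == bln then "= " ++ aln ++ "\n"
       else "< " ++ aln ++ "\n" ++ "> " ++ bln ++ "\n") :: pvPairDiff aa bb

def linediff_alt (a : String) (b : String) : String :=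
  PySem.Str.join "" (pvPairDiff (PySem.Str.splitlines a) (PySem.Str.splitlines b))

-- ===== PRECONDITION & SPEC =====
def Spec_linediff (a : String) (b : String) (out : String) : Prop := out = linediff_alt a b
instance (a : String) (b : String) (out : String) : Decidable (Spec_linediff a b out) := by unfold Spec_linediff; infer_instance

-- ===== CLAIM (what is proved, stated in full; the proofs are below) =====
def Claim_equal_linediff : Prop := ∀ (a : String) (b : String), Dom_linediff a b → Spec_linediff a b (linediff a b)

-- ===== LEMMAS AND PROOFS =====

theorem pvIntercalate_nil (L : List (List Char)) : ([] : List Char).intercalate L = L.flatten := by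
  induction L with
  | nil => rfl
  | cons a l ih =>
    cases l with
    | nil => simp [List.intercalate]
    | cons b m =>
      simp only [List.intercalate, List.intersperse] at *
      simp_all

theorem pvJoin_nil : PySem.Str.join "" ([] : List String) = "" := rfl

theorem pvJoin_cons (x : String) (xs : List String) :
    PySem.Str.join "" (x :: xs) = x ++ PySem.Str.join "" xs := by
  simp [PySem.Str.join, PySem.Chars.join, pvIntercalate_nil]

theorem pvJoin_append (xs ys : List String) :
    PySem.Str.join "" (xs ++ ys) = PySem.Str.join "" xs ++ PySem.Str.join "" ys := by
  induction xs with
  | nil => simp [pvJoin_nil]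
  | cons x xs ih => simp [pvJoin_cons, ih, String.append_assoc]

theorem pvFoldl_join {ι : Type} (l : List ι) (g : ι → String) (s : String) :
    l.foldl (fun acc i => acc ++ g i) s = s ++ PySem.Str.join "" (l.map g) := by
  induction l generalizing s with
  | nil => simp [pvJoin_nil]
  | cons x xs ih => simp [List.foldl_cons, ih, pvJoin_cons, String.append_assoc]

-- the per-index entry A's first loop emits (Nat-index form)
def pvEntry (aa bb : List String) (k : Nat) : String :=
  if k < bb.length then
    (if aa.getD k "" == bb.getD k "" then "= " ++ aa.getD k "" ++ "\n"
     else "< " ++ aa.getD k "" ++ "\n" ++ "> " ++ bb.getD k "" ++ "\n")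
  else "< " ++ aa.getD k "" ++ "\n"

-- the same entry, Int-index form matching the port's loop body
def pvEntryI (aa bb : List String) (i : Int) : String :=
  if i < PySem.List.len bb then
    (if PySem.List.pyGetD aa i "" == PySem.List.pyGetD bb i "" then
       "= " ++ PySem.List.pyGetD aa i "" ++ "\n"
     else "< " ++ PySem.List.pyGetD aa i "" ++ "\n" ++ "> " ++ PySem.List.pyGetD bb i "" ++ "\n")
  else "< " ++ PySem.List.pyGetD aa i "" ++ "\n"

theorem pvPairDiff_nil (bb : List String) :
    pvPairDiff [] bb = bb.map (fun x => "> " ++ x ++ "\n") := by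
  induction bb with
  | nil => simp [pvPairDiff]
  | cons y bb ih => simp [pvPairDiff, ih]

theorem pvPairDiff_eq (aa bb : List String) :
    pvPairDiff aa bb =
      (List.range aa.length).map (pvEntry aa bb)
        ++ (bb.drop aa.length).map (fun x => "> " ++ x ++ "\n") := by
  induction aa generalizing bb with
  | nil => simp [pvPairDiff_nil]
  | cons x aa ih =>
    cases bb with
    | nil =>
      simp [pvPairDiff, ih, List.range_succ_eq_map, List.map_map, Function.comp_def, pvEntry,
        String.append_assoc]
    | cons y bb =>
      simp [pvPairDiff, ih, List.range_succ_eq_map, List.map_map, Function.comp_def, pvEntry,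
        String.append_assoc]

theorem pvMapRange (aa bb : List String) :
    (PySem.List.pyRange 0 (PySem.List.len aa) 1).map (pvEntryI aa bb)
      = (List.range aa.length).map (pvEntry aa bb) := by
  rw [PySem.List.pyRange_one, List.map_map]
  simp only [PySem.List.len_eq, sub_zero, Int.toNat_natCast]
  apply List.map_congr_left
  intro k hk
  simp [pvEntryI, pvEntry, Function.comp, PySem.List.len_eq, Nat.cast_lt]

theorem linediff_eq_alt (a b : String) : linediff a b = linediff_alt a b := by
  unfold linediff linediff_alt
  dsimp only
  generalize PySem.Str.splitlines a = aa
  generalize PySem.Str.splitlines b = bb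
  have hbody : (fun (s : String) (i : Int) =>
      if i < PySem.List.len bb then
        if PySem.List.pyGetD aa i "" == PySem.List.pyGetD bb i "" then
          s ++ "= " ++ PySem.List.pyGetD aa i "" ++ "\n"
        else
          s ++ "< " ++ PySem.List.pyGetD aa i "" ++ "\n" ++ "> " ++ PySem.List.pyGetD bb i "" ++ "\n"
      else s ++ "< " ++ PySem.List.pyGetD aa i "" ++ "\n")
      = fun s i => s ++ pvEntryI aa bb i := by
    funext s i
    simp only [pvEntryI]
    split_ifs <;> simp [String.append_assoc]
  have hbody2 : (fun (s : String) (x : String) => s ++ "> " ++ x ++ "\n")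
      = fun s x => s ++ ("> " ++ x ++ "\n") := by
    funext s x; simp [String.append_assoc]
  rw [hbody, pvFoldl_join, pvMapRange, pvPairDiff_eq, pvJoin_append]
  split_ifs with h
  · rw [PySem.List.foldl_pyRange_pyGetD bb "" (fun s x => s ++ "> " ++ x ++ "\n") _
      (by simp [PySem.List.len_eq])]
    rw [hbody2, pvFoldl_join]
    simp [PySem.List.len_eq, String.append_assoc]
  · have hle : bb.length ≤ aa.length := by
      simp only [PySem.List.len_eq, not_lt, gt_iff_lt, Nat.cast_le] at h
      exact_mod_cast h
    rw [List.drop_eq_nil_of_le hle]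
    simp [pvJoin_nil]

-- ===== VERDICT (by name: the statement is the Claim_ definition above) =====
theorem linediff_spec : Claim_equal_linediff := by
  intro a b _
  unfold Spec_linediff
  exact linediff_eq_alt a b
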